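-- pv_equiv track=rewrite | github.com/Matthieu1933/Reveil-Connecte | assistant_vocal/mi_band/pymb1a-master/mi_band_1a.py | compute_hash_code
-- ===== SOURCE A (Python) =====
-- def compute_hash_code(some_string):
--     """Clone of the Java hashCode() function
--     @param {MiBand1A} self
--     @param {string} some_string
--     @return {integer} hash
--     """
--     hash = 0
--
--     if (len(some_string) == 0):
--         return hash;
--
--     for i in range(0, len(some_string)):
--         char = ord(some_string[i])
--         hash = ((hash << 5) - hash) + char
--         hash = hash & hash  # Convert to 32bit integer
--
--     return hash
-- ===== SOURCE B (Python) =====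
-- def compute_hash_code(some_string):
--     # power-weighted polynomial sum: ord(c) * 31**position, accumulated back-to-front
--     total = 0
--     power = 1
--     for ch in reversed(some_string):
--         total += ord(ch) * power
--         power *= 31
--     return total
-- ===== Notes on version B (the rewrite author's own statement) =====
-- stated objective: simpler
-- what changed: Replaces the indexed Horner loop with its shift-and-subtract and the no-op self-AND masking step by a back-to-front power-weighted sum (total += ord(c)*31**p), exploiting that A never truncates so the result is the exact polynomial.
import Mathlib
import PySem

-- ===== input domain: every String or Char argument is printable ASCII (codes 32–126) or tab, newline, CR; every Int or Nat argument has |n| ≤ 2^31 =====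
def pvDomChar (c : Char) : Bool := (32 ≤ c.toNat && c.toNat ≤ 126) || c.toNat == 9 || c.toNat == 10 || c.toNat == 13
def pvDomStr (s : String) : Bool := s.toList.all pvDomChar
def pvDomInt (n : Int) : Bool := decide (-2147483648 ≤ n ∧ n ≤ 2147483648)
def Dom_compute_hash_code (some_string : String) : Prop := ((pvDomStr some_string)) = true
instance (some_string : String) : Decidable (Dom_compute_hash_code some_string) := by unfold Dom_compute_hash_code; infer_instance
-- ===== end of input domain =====

-- B replaces A's Horner loop (shift-and-subtract, plus the no-op self-AND masking step) by a
-- back-to-front power-weighted sum ord(c)*31^position; same exact value, simpler.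

-- ===== PORT A =====
-- A: hash = 0; early return on empty; per character: hash = ((hash<<5) - hash) + char; hash = self-AND(hash)
def compute_hash_code (some_string : String) : Int :=
  if some_string.toList.length == 0 then 0
  else
    some_string.toList.foldl
      (fun hash ch =>
        let char : Int := ch.toNat
        let h2 := (hash <<< (5 : Nat)) - hash + char
        Int.land h2 h2) 0

-- ===== PORT B =====
-- B: total = 0; power = 1; for ch in reversed(s): total += ord(ch)*power; power *= 31
def compute_hash_code_alt (some_string : String) : Int :=
  (some_string.toList.reverse.foldl
      (fun (st : Int × Int) ch => (st.1 + (ch.toNat : Int) * st.2, st.2 * 31))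
      (0, 1)).1

-- ===== PRECONDITION & SPEC =====
def Spec_compute_hash_code (some_string : String) (out : Int) : Prop := out = compute_hash_code_alt some_string
instance (some_string : String) (out : Int) : Decidable (Spec_compute_hash_code some_string out) := by unfold Spec_compute_hash_code; infer_instance

-- ===== CLAIM (what is proved, stated in full; the proofs are below) =====
def Claim_equal_compute_hash_code : Prop := ∀ (some_string : String), Dom_compute_hash_code some_string → Spec_compute_hash_code some_string (compute_hash_code some_string)

-- ===== LEMMAS AND PROOFS =====

theorem int_land_self (x : Int) : Int.land x x = x := by
  cases x <;> simp [Int.land]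

-- A's step is multiplication by 31 plus the character.
theorem step_eq (hash char : Int) :
    Int.land ((hash <<< (5 : Nat)) - hash + char) ((hash <<< (5 : Nat)) - hash + char)
      = hash * 31 + char := by
  rw [int_land_self, Int.shiftLeft_eq]
  ring

-- Horner fold with the simplified step.
def horner (l : List Char) : Int :=
  l.foldl (fun h ch => h * 31 + (ch.toNat : Int)) 0

theorem horner_foldl_shift (l : List Char) (a : Int) :
    l.foldl (fun h ch => h * 31 + (ch.toNat : Int)) a
      = a * 31 ^ l.length + horner l := by
  induction l generalizing a with
  | nil => simp only [List.foldl_nil, List.length_nil, horner]; ring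
  | cons c t ih =>
    simp only [List.foldl_cons, List.length_cons, horner] at *
    rw [ih (a * 31 + (c.toNat : Int)), ih ((0 : Int) * 31 + (c.toNat : Int))]
    ring

theorem foldA_eq_horner (l : List Char) :
    l.foldl (fun (hash : Int) ch =>
        let char : Int := ch.toNat
        let h2 := (hash <<< (5 : Nat)) - hash + char
        Int.land h2 h2) 0 = horner l := by
  have hf : (fun (hash : Int) (ch : Char) =>
        let char : Int := ch.toNat
        let h2 := (hash <<< (5 : Nat)) - hash + char
        Int.land h2 h2) = fun (h : Int) ch => h * 31 + (ch.toNat : Int) := by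
    funext h ch
    exact step_eq h ch.toNat
  rw [hf]
  rfl

theorem foldB_eq (l : List Char) (a p : Int) :
    l.reverse.foldl (fun (st : Int × Int) ch => (st.1 + (ch.toNat : Int) * st.2, st.2 * 31)) (a, p)
      = (a + p * horner l, p * 31 ^ l.length) := by
  induction l generalizing a p with
  | nil => simp [horner]
  | cons c t ih =>
    have h : horner (c :: t) = (c.toNat : Int) * 31 ^ t.length + horner t := by
      simp only [horner, List.foldl_cons]
      rw [horner_foldl_shift t ((0 : Int) * 31 + (c.toNat : Int))]
      simp only [horner]
      ring
    simp only [List.reverse_cons, List.foldl_append, List.foldl_cons, List.foldl_nil, ih,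
      List.length_cons, h, Prod.mk.injEq]
    constructor <;> ring

-- ===== VERDICT (by name: the statement is the Claim_ definition above) =====
theorem compute_hash_code_spec : Claim_equal_compute_hash_code := by
  intro s _
  unfold Spec_compute_hash_code compute_hash_code compute_hash_code_alt
  rw [foldB_eq]
  by_cases h : s.toList.length = 0
  · have he : s.toList = [] := List.length_eq_zero_iff.mp h
    simp [he, horner]
  · simp only [beq_iff_eq, h, if_false]
    rw [foldA_eq_horner]
    ring
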